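-- pv_equiv track=rewrite | github.com/nobodyyang/machine-learning | sinaNewsClassify.py | matrixFeatures
-- ===== SOURCE A (Python) =====
-- def matrixFeatures(trainDataList, testDataList, featureWords):
--     """
--         Function:
--             根据feature_words将文本向量化
--         Parameters:
--             trainDataList - 训练集
--             testDataList - 测试集
--             featureWords - 特征集
--         Returns:
--             trainFeatureList - 训练集向量化列表
--             testFeatureList - 测试集向量化列表
--         Modify:
--             2018-08-22
--         """
--
--     def matrixFeature(text, featureWords):
--         textWords = set(text)
--         # 出现在特征集中，则置1
--         features = [1 if word in textWords else 0 for word in featureWords]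
--         return features
--
--     trainFeatureList = [matrixFeature(text, featureWords) for text in trainDataList]
--     testFeatureList = [matrixFeature(text, featureWords) for text in testDataList]
--     return trainFeatureList, testFeatureList
-- ===== SOURCE B (Python) =====
-- def matrixFeatures(trainDataList, testDataList, featureWords):
--     # Inverted index: each feature word -> all its positions in featureWords
--     index = {}
--     for i, word in enumerate(featureWords):
--         index.setdefault(word, []).append(i)
--     F = len(featureWords)
--
--     def vectorize(text):
--         vec = [0] * F
--         for word in text:
--             for i in index.get(word, ()):
--                 vec[i] = 1
--         return vec
--
--     return [vectorize(text) for text in trainDataList], [vectorize(text) for text in testDataList]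
-- ===== Notes on version B (the rewrite author's own statement) =====
-- stated objective: alternative
-- what changed: Replaces the per-text scan over all feature words with a membership test by a precomputed inverted index (feature word -> list of its positions) and a zero-initialized vector updated per text word via dict lookup.
import Mathlib
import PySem

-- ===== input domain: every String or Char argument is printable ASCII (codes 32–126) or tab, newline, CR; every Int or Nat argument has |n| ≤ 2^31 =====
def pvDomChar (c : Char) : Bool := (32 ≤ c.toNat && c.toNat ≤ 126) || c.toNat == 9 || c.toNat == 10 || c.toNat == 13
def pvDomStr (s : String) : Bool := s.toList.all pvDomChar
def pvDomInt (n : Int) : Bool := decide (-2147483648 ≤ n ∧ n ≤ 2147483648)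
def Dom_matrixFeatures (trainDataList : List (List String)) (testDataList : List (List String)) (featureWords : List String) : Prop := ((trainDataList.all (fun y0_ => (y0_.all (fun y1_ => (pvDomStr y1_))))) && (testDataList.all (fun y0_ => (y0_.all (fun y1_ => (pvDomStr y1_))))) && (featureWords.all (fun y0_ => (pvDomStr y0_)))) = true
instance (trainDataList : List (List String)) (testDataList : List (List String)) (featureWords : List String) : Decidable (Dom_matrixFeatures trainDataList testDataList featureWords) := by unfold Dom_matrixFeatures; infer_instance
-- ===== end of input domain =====

-- B replaces A's per-text membership scan over featureWords by a precomputed inverted index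
-- (feature word -> all its positions) and zero-vectors updated per text word (objective: alternative).


-- ===== PORT A =====
-- inner helper matrixFeature: textWords = set(text); [1 if word in textWords else 0 for word in featureWords]
def mfFeature (text : List String) (featureWords : List String) : List Int :=
  let textWords := PySem.Set.ofList text
  featureWords.map (fun word => if PySem.Set.contains textWords word then (1 : Int) else 0)

def matrixFeatures (trainDataList : List (List String)) (testDataList : List (List String)) (featureWords : List String) : List (List Int) × List (List Int) :=
  let trainFeatureList := trainDataList.map (fun text => mfFeature text featureWords)
  let testFeatureList := testDataList.map (fun text => mfFeature text featureWords)
  (trainFeatureList, testFeatureList)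

-- ===== PORT B =====
-- index = {}; for i, word in enumerate(featureWords): index.setdefault(word, []).append(i)
-- (setdefault+append is exactly Dict.modify word [] (· ++ [i]): same value, same key position)
def mfAltIndex (featureWords : List String) : PySem.Dict String (List Int) :=
  (PySem.List.enumerate featureWords).foldl
    (fun d p => d.modify p.2 [] (fun l => l ++ [p.1])) PySem.Dict.empty

-- vec = [0]*F; for word in text: for i in index.get(word, ()): vec[i] = 1
-- every stored index i satisfies 0 ≤ i < F, so 'vec.set i.toNat 1' is exactly Python's vec[i] = 1
def mfAltVectorize (index : PySem.Dict String (List Int)) (F : Nat) (text : List String) : List Int :=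
  text.foldl
    (fun vec word => (index.getD word []).foldl (fun vec i => vec.set i.toNat 1) vec)
    (List.replicate F 0)

def matrixFeatures_alt (trainDataList : List (List String)) (testDataList : List (List String)) (featureWords : List String) : List (List Int) × List (List Int) :=
  let index := mfAltIndex featureWords
  let F := featureWords.length
  (trainDataList.map (fun text => mfAltVectorize index F text),
   testDataList.map (fun text => mfAltVectorize index F text))

-- ===== PRECONDITION & SPEC =====
def Spec_matrixFeatures (trainDataList : List (List String)) (testDataList : List (List String)) (featureWords : List String) (out : List (List Int) × List (List Int)) : Prop := out = matrixFeatures_alt trainDataList testDataList featureWords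
instance (trainDataList : List (List String)) (testDataList : List (List String)) (featureWords : List String) (out : List (List Int) × List (List Int)) : Decidable (Spec_matrixFeatures trainDataList testDataList featureWords out) := by unfold Spec_matrixFeatures; infer_instance

-- ===== CLAIM (what is proved, stated in full; the proofs are below) =====
def Claim_equal_matrixFeatures : Prop := ∀ (trainDataList : List (List String)) (testDataList : List (List String)) (featureWords : List String), Dom_matrixFeatures trainDataList testDataList featureWords → Spec_matrixFeatures trainDataList testDataList featureWords (matrixFeatures trainDataList testDataList featureWords)

-- ===== LEMMAS AND PROOFS =====

-- the inverted index maps w to exactly the positions of w in featureWords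
theorem foldl_modify_append_getD (l : List (Int × String)) (d : PySem.Dict String (List Int)) (w : String) :
    (l.foldl (fun d p => d.modify p.2 [] (fun xs => xs ++ [p.1])) d).getD w [] =
      d.getD w [] ++ (l.filter (fun p => p.2 == w)).map (·.1) := by
  induction l generalizing d with
  | nil => simp
  | cons p t ih =>
    rw [List.foldl_cons, ih]
    by_cases h : p.2 = w
    · subst h
      simp [PySem.Dict.getD_modify_self]
    · simp [PySem.Dict.getD_modify, h, Ne.symm h]

theorem mfAltIndex_getD (featureWords : List String) (w : String) :
    (mfAltIndex featureWords).getD w [] =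
      ((PySem.List.enumerate featureWords).filter (fun p => p.2 == w)).map (·.1) := by
  unfold mfAltIndex
  rw [foldl_modify_append_getD]
  simp [PySem.Dict.getD_empty]

theorem mem_mfAltIndex_getD (featureWords : List String) (w : String) (i : Int) :
    i ∈ (mfAltIndex featureWords).getD w [] ↔
      ∃ (k : Nat), ∃ (h : k < featureWords.length), i = (k : Int) ∧ featureWords[k] = w := by
  simp only [mfAltIndex_getD, List.mem_map, List.mem_filter, PySem.List.mem_enumerate_iff]
  constructor
  · rintro ⟨p, ⟨⟨k, hk, rfl⟩, hw⟩, rfl⟩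
    exact ⟨k, hk, by simp, by simpa using hw⟩
  · rintro ⟨k, hk, rfl, hw⟩
    exact ⟨(0 + (k : Int), featureWords[k]), ⟨⟨k, hk, rfl⟩, by simp [hw]⟩, by simp⟩

-- the inner set-to-1 fold, characterized positionwise
theorem foldl_set_getElem? (l : List Int) (v : List Int) (k : Nat)
    (hl : ∀ i ∈ l, 0 ≤ i ∧ i < (v.length : Int)) :
    (l.foldl (fun vec i => vec.set i.toNat 1) v)[k]? =
      if (k : Int) ∈ l then (if k < v.length then some 1 else none) else v[k]? := by
  induction l generalizing v with
  | nil => simp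
  | cons i t ih =>
    rw [List.foldl_cons, ih]
    · have hi := hl i (by simp)
      by_cases hk : (k : Int) ∈ t
      · simp [hk]
      · by_cases hik : i = (k : Int)
        · have hnat : i.toNat = k := by omega
          have hklen : k < v.length := by omega
          simp [hik, hklen]
        · have hnat : i.toNat ≠ k := by omega
          have hne : (k : Int) ≠ i := fun h => hik h.symm
          simp [hk, hne, hnat]
    · intro j hj
      have := hl j (by simp [hj])
      simpa using this

theorem foldl_set_length (l : List Int) (v : List Int) :
    (l.foldl (fun vec i => vec.set i.toNat 1) v).length = v.length := by
  induction l generalizing v with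
  | nil => rfl
  | cons i t ih => simp [List.foldl, ih]

theorem foldl_vec_getElem? (g : String → List Int) (ts : List String) (v : List Int) (k : Nat)
    (hg : ∀ w, ∀ i ∈ g w, 0 ≤ i ∧ i < (v.length : Int)) :
    (ts.foldl (fun vec word => (g word).foldl (fun vec i => vec.set i.toNat 1) vec) v)[k]? =
      if ∃ w ∈ ts, (k : Int) ∈ g w then (if k < v.length then some 1 else none) else v[k]? := by
  induction ts generalizing v with
  | nil => simp
  | cons w t ih =>
    rw [List.foldl_cons, ih]
    · rw [foldl_set_getElem? _ _ _ (hg w), foldl_set_length]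
      by_cases h1 : ∃ w' ∈ t, (k : Int) ∈ g w'
      · simp [h1]
      · by_cases h2 : (k : Int) ∈ g w
        · simp [h1, h2]
        · simp [h1, h2]
    · intro w' i hi
      rw [foldl_set_length]
      exact hg w' i hi

theorem mfAltVectorize_eq (featureWords : List String) (text : List String) :
    mfAltVectorize (mfAltIndex featureWords) featureWords.length text = mfFeature text featureWords := by
  apply List.ext_getElem?
  intro k
  unfold mfAltVectorize mfFeature
  rw [foldl_vec_getElem?]
  · rw [List.length_replicate]
    have hmem : ∀ w, ((k : Int) ∈ (mfAltIndex featureWords).getD w [] ↔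
        ∃ (h : k < featureWords.length), featureWords[k] = w) := by
      intro w
      rw [mem_mfAltIndex_getD]
      constructor
      · rintro ⟨j, hj, hkj, hw⟩
        have : k = j := by omega
        subst this
        exact ⟨hj, hw⟩
      · rintro ⟨h, hw⟩
        exact ⟨k, h, rfl, hw⟩
    by_cases hk : k < featureWords.length
    · have hcond : (∃ w ∈ text, (k : Int) ∈ (mfAltIndex featureWords).getD w []) ↔
          featureWords[k] ∈ text := by
        constructor
        · rintro ⟨w, hw, hm⟩
          obtain ⟨_, rfl⟩ := (hmem w).mp hm
          exact hw
        · intro h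
          exact ⟨featureWords[k], h, (hmem _).mpr ⟨hk, rfl⟩⟩
      rw [List.getElem?_map]
      by_cases ht : featureWords[k] ∈ text
      · simp [hcond, ht, hk, PySem.Set.contains, PySem.Set.mem_ofList]
      · simp [hcond, ht, hk, PySem.Set.contains, PySem.Set.mem_ofList]
    · have hcond : ¬ (∃ w ∈ text, (k : Int) ∈ (mfAltIndex featureWords).getD w []) := by
        rintro ⟨w, _, hm⟩
        obtain ⟨h, _⟩ := (hmem w).mp hm
        exact hk h
      simp [hcond, hk]
  · intro w i hi
    rw [List.length_replicate]
    obtain ⟨j, hj, rfl, _⟩ := (mem_mfAltIndex_getD featureWords w i).mp hi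
    exact ⟨by positivity, by exact_mod_cast hj⟩

-- ===== VERDICT (by name: the statement is the Claim_ definition above) =====
theorem matrixFeatures_spec : Claim_equal_matrixFeatures := by
  intro tr te fw _
  unfold Spec_matrixFeatures matrixFeatures matrixFeatures_alt
  simp [mfAltVectorize_eq]
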